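-- pv_equiv track=rewrite | github.com/lennard0011/aoc2024 | 5/main.py | get_rules_map
-- ===== SOURCE A (Python) =====
-- def get_rules_map(rules):
--     rules_map = {}
--
--     for rule in rules:
--         [first, second] = rule.split("|")
--         if second not in rules_map:
--             rules_map[second] = []
--         rules_map[second].append(first)
--     return rules_map
-- ===== SOURCE B (Python) =====
-- def get_rules_map(rules):
--     pairs = []
--     for rule in rules:
--         [first, second] = rule.split("|")
--         pairs.append((first, second))
--     seconds = list(dict.fromkeys(s for _, s in pairs))
--     return {s: [f for f, t in pairs if t == s] for s in seconds}
-- ===== Notes on version B (the rewrite author's own statement) =====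
-- stated objective: alternative
-- what changed: B first materialises the list of (first, second) pairs, then computes the key order once with dict.fromkeys and builds each group by a per-key comprehension over the pairs, instead of A's single-pass incremental dict mutation.
import Mathlib
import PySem

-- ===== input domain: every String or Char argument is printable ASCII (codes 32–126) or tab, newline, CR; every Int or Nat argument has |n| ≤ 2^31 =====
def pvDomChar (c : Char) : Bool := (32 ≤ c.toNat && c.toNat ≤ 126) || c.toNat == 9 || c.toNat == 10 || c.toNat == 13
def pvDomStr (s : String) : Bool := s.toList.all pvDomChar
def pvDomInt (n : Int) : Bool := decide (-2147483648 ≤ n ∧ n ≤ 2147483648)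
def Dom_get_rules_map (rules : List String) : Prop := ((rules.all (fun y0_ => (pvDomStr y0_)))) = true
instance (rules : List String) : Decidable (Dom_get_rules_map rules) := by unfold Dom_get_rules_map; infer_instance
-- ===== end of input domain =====

-- B groups the rules by a two-phase pass (collect pairs, then dedup keys + per-key comprehension)
-- instead of A's single-pass incremental dict mutation; same return value, no speed claim.

-- ===== PORT A =====
-- A: one pass, mutating dict: if key missing insert [], then append first.
def get_rules_map (rules : List String) : List (String × List String) :=
  (rules.foldl (fun d rule =>
    match PySem.Str.split? rule "|" with
    | some [first, second] =>
        let d' := if d.contains second then d else d.insert second ([] : List String)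
        d'.modify second [] (fun l => l ++ [first])
    | _ => d)  -- unreachable under Pre_ (Python raises ValueError on the unpack)
    PySem.Dict.empty).items

-- ===== PORT B =====
-- the strict 2-element unpack '[first, second] = rule.split("|")' of B (none = ValueError)
def pvUnpack2 (rule : String) : Option (String × String) :=
  let parts := (PySem.Str.split? rule "|").getD []
  if h : parts.length = 2 then some (parts[0], parts[1]) else none

def get_rules_map_alt (rules : List String) : List (String × List String) :=
  let pairs := rules.foldl (fun ps rule =>
    match pvUnpack2 rule with
    | some (first, second) => ps ++ [(first, second)]
    | none => ps)  -- unreachable under Pre_ (Python raises ValueError on the unpack)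
    []
  let seconds := PySem.List.dedup (pairs.map (·.2))
  seconds.map (fun s => (s, (pairs.filter (fun p => p.2 == s)).map (·.1)))

-- ===== PRECONDITION & SPEC =====
-- Pre_ excludes rules whose split on "|" does not have exactly two pieces: there the
-- Python A raises ValueError on the unpack (B raises identically).
def Pre_get_rules_map (rules : List String) : Prop :=
  ∀ r ∈ rules, ((PySem.Str.split? r "|").getD []).length = 2
instance (rules : List String) : Decidable (Pre_get_rules_map rules) := by unfold Pre_get_rules_map; infer_instance
def pvWitness_get_rules_map : List String := ["1|2", "3|2", "2|4"]

def Spec_get_rules_map (rules : List String) (out : List (String × List String)) : Prop := out = get_rules_map_alt rules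
instance (rules : List String) (out : List (String × List String)) : Decidable (Spec_get_rules_map rules out) := by unfold Spec_get_rules_map; infer_instance

-- ===== CLAIM (what is proved, stated in full; the proofs are below) =====
def Claim_equal_get_rules_map : Prop := ∀ (rules : List String), Dom_get_rules_map rules → Pre_get_rules_map rules → Spec_get_rules_map rules (get_rules_map rules)

-- ===== LEMMAS AND PROOFS =====

-- the (first, second) pairs both ports extract from the rules (malformed rules skipped)
def pvPairsOf (rules : List String) : List (String × String) :=
  rules.filterMap pvUnpack2

lemma pvPairsB (rules : List String) :
    rules.foldl (fun ps rule =>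
      match pvUnpack2 rule with
      | some (first, second) => ps ++ [(first, second)]
      | none => ps) [] = pvPairsOf rules := by
  have h : ∀ (rs : List String) (acc : List (String × String)),
      rs.foldl (fun ps rule =>
        match pvUnpack2 rule with
        | some (first, second) => ps ++ [(first, second)]
        | none => ps) acc = acc ++ pvPairsOf rs := by
    intro rs
    induction rs with
    | nil => intro acc; simp [pvPairsOf]
    | cons r rs ih =>
      intro acc
      simp only [List.foldl_cons, pvPairsOf, List.filterMap_cons]
      cases hs : pvUnpack2 r with
      | none => rw [ih]; rfl
      | some p => rw [ih]; simp [pvPairsOf]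
  simpa using h rules []

lemma pvStep_eq_modify (d : PySem.Dict String (List String)) (f s : String) :
    (if d.contains s then d else d.insert s ([] : List String)).modify s [] (fun l => l ++ [f])
      = d.modify s [] (fun l => l ++ [f]) := by
  by_cases h : d.contains s = true
  · rw [if_pos h]
  · rw [if_neg h]
    simp only [PySem.Dict.modify]
    rw [PySem.Dict.getD_insert_self, PySem.Dict.insert_insert_self,
      PySem.Dict.getD_of_not_contains d [] (by simpa using h)]

lemma pvFoldA (rules : List String) (d : PySem.Dict String (List String)) :
    rules.foldl (fun d rule =>
      match PySem.Str.split? rule "|" with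
      | some [first, second] =>
          let d' := if d.contains second then d else d.insert second ([] : List String)
          d'.modify second [] (fun l => l ++ [first])
      | _ => d) d
    = (pvPairsOf rules).foldl (fun d p => d.modify p.2 [] (fun l => l ++ [p.1])) d := by
  induction rules generalizing d with
  | nil => simp [pvPairsOf]
  | cons r rs ih =>
    simp only [List.foldl_cons, pvPairsOf, List.filterMap_cons]
    cases hs : PySem.Str.split? r "|" with
    | none =>
      have hu : pvUnpack2 r = none := by simp [pvUnpack2, hs]
      rw [hu]; exact ih d
    | some parts =>
      match parts with
      | [] =>
        have hu : pvUnpack2 r = none := by simp [pvUnpack2, hs]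
        rw [hu]; exact ih d
      | [a] =>
        have hu : pvUnpack2 r = none := by simp [pvUnpack2, hs]
        rw [hu]; exact ih d
      | [a, b] =>
        have hu : pvUnpack2 r = some (a, b) := by simp [pvUnpack2, hs]
        rw [hu]
        simp only [List.foldl_cons]
        rw [← pvStep_eq_modify d a b]
        exact ih _
      | a :: b :: c :: t =>
        have hu : pvUnpack2 r = none := by simp [pvUnpack2, hs]
        rw [hu]; exact ih d

-- ===== VERDICT (by name: the statement is the Claim_ definition above) =====
theorem get_rules_map_spec : Claim_equal_get_rules_map := by
  intro rules _ _
  unfold Spec_get_rules_map get_rules_map get_rules_map_alt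
  rw [pvFoldA, pvPairsB]
  set pairs := pvPairsOf rules with hp
  have hfold : pairs.foldl (fun d p => d.modify p.2 [] (fun l => l ++ [p.1])) PySem.Dict.empty
      = (pairs.map Prod.swap).foldl (fun d p => d.modify p.1 [] (fun l => l ++ [p.2])) PySem.Dict.empty := by
    simp only [List.foldl_map, Prod.fst_swap, Prod.snd_swap]
  have hnd : ((pairs.map Prod.swap).foldl (fun d p => d.modify p.1 [] (fun l => l ++ [p.2])) PySem.Dict.empty).keys.Nodup := by
    exact PySem.Dict.nodup_keys_foldl_modify_key (pairs.map Prod.swap) (fun p => p.1) []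
      (fun d p => fun l => l ++ [p.2]) PySem.Dict.empty (by simp)
  rw [hfold, PySem.Dict.items_eq_map_keys _ hnd ([] : List String),
    PySem.Dict.keys_foldl_modify_key]
  simp only [PySem.Dict.keys_empty, PySem.Set.update_nil_left, PySem.Dict.getD_foldl_modify_append,
    PySem.Dict.getD_empty]
  rw [← PySem.List.dedup_eq_ofList]
  have hmap : (pairs.map Prod.swap).map (fun p => p.1) = pairs.map (fun p => p.2) := by
    simp [Function.comp_def]
  rw [hmap]
  apply List.map_congr_left
  intro s _
  simp [List.filter_map, Function.comp_def]
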